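-- pv_equiv track=rewrite | github.com/byunsuyoung/coding_study | 프로그래머스/lv0/120815. 피자 나눠 먹기 （2）/피자 나눠 먹기 （2）.py | solution
-- ===== SOURCE A (Python) =====
-- def solution(n):
--     answer = 1
--     a = 6
--     while True:
--         if a % n == 0:
--             return answer
--         else:
--             a += 6
--             answer += 1
--     return answer
-- ===== SOURCE B (Python) =====
-- def solution(n):
--     # least k >= 1 with 6*k divisible by n is |n| // gcd(6, |n|)
--     a, b = 6, abs(n)
--     while b:
--         a, b = b, a % b
--     return abs(n) // a
-- ===== Notes on version B (the rewrite author's own statement) =====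
-- stated objective: faster
-- what changed: replaces A's linear search over multiples of 6 with the closed form |n| // gcd(6,|n|) computed by Euclid's algorithm
import Mathlib
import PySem

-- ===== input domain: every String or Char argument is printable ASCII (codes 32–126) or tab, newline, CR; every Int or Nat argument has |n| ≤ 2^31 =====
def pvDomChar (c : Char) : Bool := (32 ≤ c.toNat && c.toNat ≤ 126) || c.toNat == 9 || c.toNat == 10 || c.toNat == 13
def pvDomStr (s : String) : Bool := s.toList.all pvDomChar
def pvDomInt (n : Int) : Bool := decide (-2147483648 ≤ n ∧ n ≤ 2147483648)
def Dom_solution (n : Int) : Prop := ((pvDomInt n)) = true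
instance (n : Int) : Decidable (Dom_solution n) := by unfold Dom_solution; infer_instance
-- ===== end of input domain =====

-- B replaces A's linear search over multiples of 6 by the closed form |n| // gcd(6,|n|) via Euclid's algorithm (faster).


-- ===== PORT A =====
-- A's 'while True' loop, with fuel n.natAbs: on every n ≠ 0 the loop returns within
-- |n| iterations (the answer is at most |n|), so the fuel never runs out on Pre_.
-- The test 'a % n == 0' is ported as 'a % n = 0' (Lean emod): exact, since Python's
-- mod and Lean's emod are both 0 precisely when n ∣ a (any n ≠ 0).
def solutionGo (fuel : Nat) (n : Int) (answer : Int) (a : Int) : Int :=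
  match fuel with
  | 0 => answer
  | fuel + 1 =>
    if a % n = 0 then answer
    else solutionGo fuel n (answer + 1) (a + 6)

def solution (n : Int) : Int := solutionGo n.natAbs n 1 6

-- ===== PORT B =====
-- Euclid's loop from Source B; operands are the nonnegative ints 6 and abs(n), so Nat
-- arithmetic (%, /) is exact for Python's % and // here.
def euclidGo (a b : Nat) : Nat :=
  if h : b = 0 then a else euclidGo b (a % b)
decreasing_by exact Nat.mod_lt _ (Nat.pos_of_ne_zero h)

def solution_alt (n : Int) : Int := ((n.natAbs / euclidGo 6 n.natAbs : Nat) : Int)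

-- ===== PRECONDITION & SPEC =====
-- Pre_ excludes n = 0, where Python A raises ZeroDivisionError on 'a % n'.
def Pre_solution (n : Int) : Prop := n ≠ 0
instance (n : Int) : Decidable (Pre_solution n) := by unfold Pre_solution; infer_instance
def pvWitness_solution : Int := 7

def Spec_solution (n : Int) (out : Int) : Prop := out = solution_alt n
instance (n : Int) (out : Int) : Decidable (Spec_solution n out) := by unfold Spec_solution; infer_instance

-- ===== CLAIM (what is proved, stated in full; the proofs are below) =====
def Claim_equal_solution : Prop := ∀ (n : Int), Dom_solution n → Pre_solution n → Spec_solution n (solution n)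

-- ===== LEMMAS AND PROOFS =====

theorem euclidGo_eq_gcd : ∀ (b a : Nat), euclidGo a b = Nat.gcd b a := by
  intro b
  induction b using Nat.strong_induction_on with
  | _ b ih =>
    intro a
    unfold euclidGo
    by_cases h : b = 0
    · simp [h]
    · rw [dif_neg h, ih (a % b) (Nat.mod_lt _ (Nat.pos_of_ne_zero h)) b]
      conv_rhs => rw [Nat.gcd_rec]

-- m ∣ 6*j iff (m / gcd 6 m) ∣ j, for m > 0
theorem dvd_six_iff (m : Nat) (hm : 0 < m) (j : Nat) :
    (m ∣ 6 * j) ↔ (m / Nat.gcd 6 m) ∣ j := by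
  have hg : 0 < Nat.gcd 6 m := Nat.gcd_pos_of_pos_right _ hm
  have h6 : Nat.gcd 6 m ∣ 6 := Nat.gcd_dvd_left _ _
  have hmd : Nat.gcd 6 m ∣ m := Nat.gcd_dvd_right _ _
  have hco : Nat.Coprime (m / Nat.gcd 6 m) (6 / Nat.gcd 6 m) :=
    (Nat.coprime_div_gcd_div_gcd hg).symm
  constructor
  · intro h
    have h' : (m / Nat.gcd 6 m) ∣ (6 / Nat.gcd 6 m) * j := by
      rcases h with ⟨c, hc⟩
      refine ⟨c, ?_⟩
      apply Nat.eq_of_mul_eq_mul_left hg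
      calc Nat.gcd 6 m * (6 / Nat.gcd 6 m * j) = (Nat.gcd 6 m * (6 / Nat.gcd 6 m)) * j := by ring
        _ = 6 * j := by rw [Nat.mul_div_cancel' h6]
        _ = m * c := hc
        _ = (Nat.gcd 6 m * (m / Nat.gcd 6 m)) * c := by rw [Nat.mul_div_cancel' hmd]
        _ = Nat.gcd 6 m * (m / Nat.gcd 6 m * c) := by ring
    exact hco.dvd_of_dvd_mul_left h'
  · intro h
    rcases h with ⟨c, hc⟩
    refine ⟨(6 / Nat.gcd 6 m) * c, ?_⟩
    calc 6 * j = 6 * (m / Nat.gcd 6 m * c) := by rw [hc]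
      _ = (6 / Nat.gcd 6 m) * Nat.gcd 6 m * (m / Nat.gcd 6 m * c) := by
            rw [Nat.div_mul_cancel h6]
      _ = (Nat.gcd 6 m * (m / Nat.gcd 6 m)) * (6 / Nat.gcd 6 m * c) := by ring
      _ = m * (6 / Nat.gcd 6 m * c) := by rw [Nat.mul_div_cancel' hmd]

-- A's loop, with a = 6*j, returns answer + (k - j) where k is the closed-form answer.
theorem solutionGo_eq (n : Int) (hn : n ≠ 0) :
    ∀ (fuel j : Nat) (ans : Int), 1 ≤ j → j ≤ n.natAbs / Nat.gcd 6 n.natAbs →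
      n.natAbs / Nat.gcd 6 n.natAbs - j < fuel →
      solutionGo fuel n ans ((6 : Int) * j) = ans + ((n.natAbs / Nat.gcd 6 n.natAbs - j : Nat) : Int) := by
  set m := n.natAbs with hm
  have hmpos : 0 < m := by simpa [hm] using Int.natAbs_pos.mpr hn
  set k := m / Nat.gcd 6 m with hk
  have hdvd : ∀ j : Nat, ((6 : Int) * j) % n = 0 ↔ k ∣ j := by
    intro j
    rw [PySem.Int.emod_eq_zero_iff_dvd]
    constructor
    · intro h
      have h' : (m : Int) ∣ (6 : Int) * j := Int.natAbs_dvd.mpr h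
      have h'' : (m : Int) ∣ ((6 * j : Nat) : Int) := by push_cast; exact h'
      exact (dvd_six_iff m hmpos j).mp (Int.ofNat_dvd.mp h'')
    · intro h
      have : m ∣ 6 * j := (dvd_six_iff m hmpos j).mpr h
      have h' : (m : Int) ∣ ((6 * j : Nat) : Int) := Int.ofNat_dvd.mpr this
      have h'' : (m : Int) ∣ (6 : Int) * j := by push_cast at h'; exact h'
      exact Int.natAbs_dvd.mp (by simpa [hm] using h'')
  intro fuel
  induction fuel with
  | zero => intro j ans _ _ hlt; omega
  | succ fuel ih =>
    intro j ans hj1 hjk hlt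
    unfold solutionGo
    by_cases hdiv : ((6 : Int) * j) % n = 0
    · rw [if_pos hdiv]
      have hkj : k ∣ j := (hdvd j).mp hdiv
      have : j = k := Nat.le_antisymm hjk (Nat.le_of_dvd (by omega) hkj)
      simp [this]
    · rw [if_neg hdiv]
      have hjk' : j < k := by
        rcases Nat.lt_or_ge j k with h | h
        · exact h
        · have hje : j = k := Nat.le_antisymm hjk h
          have : k ∣ j := by rw [hje]
          exact absurd ((hdvd j).mpr this) hdiv
      have : (6 : Int) * j + 6 = (6 : Int) * ((j + 1 : Nat) : Int) := by push_cast; ring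
      rw [this]
      have := ih (j + 1) (ans + 1) (by omega) (by omega) (by omega)
      rw [this]
      push_cast
      omega

-- ===== VERDICT (by name: the statement is the Claim_ definition above) =====
theorem solution_spec : Claim_equal_solution := by
  intro n _ hn
  unfold Spec_solution solution solution_alt
  have hmpos : 0 < n.natAbs := Int.natAbs_pos.mpr hn
  have hg : 0 < Nat.gcd 6 n.natAbs := Nat.gcd_pos_of_pos_right _ hmpos
  have hk1 : 1 ≤ n.natAbs / Nat.gcd 6 n.natAbs := by
    apply Nat.one_le_div_iff hg |>.mpr
    exact Nat.le_of_dvd hmpos (Nat.gcd_dvd_right _ _)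
  have hkm : n.natAbs / Nat.gcd 6 n.natAbs ≤ n.natAbs := Nat.div_le_self _ _
  have h6 : (6 : Int) = (6 : Int) * ((1 : Nat) : Int) := by norm_num
  rw [euclidGo_eq_gcd, Nat.gcd_comm, h6,
    solutionGo_eq n hn n.natAbs 1 1 le_rfl hk1 (by omega)]
  omega
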